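-- pv_equiv track=rewrite | github.com/ZoeChengYu/python | DEC2036.py | checkprice
-- ===== SOURCE A (Python) =====
-- def checkprice(iten,prise):
--     '''
--     prise_special=prise[0]
--     prise_grand=prise[1]
--     prise_1=prise[2:]
--     prise_2=[i[1:] for i in prise[2:]]
--     prise_3=[i[2:] for i in prise_1]
--     prise_4=[i[3:] for i in prise_1]
--     prise_5=[i[4:] for i in prise_1]
--     prise_6=[i[5:] for i in prise_1]
--     '''
--     if iten[0] in prise[0]:
--         return 'Special',10000000
--     elif iten[0] in prise[1]:
--         return 'Grand',2000000
--     elif iten[0] in prise[2:]: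
--         return '1st',200000
--     elif iten[0][1:] in [i[1:] for i in prise[2:]]:
--         return '2nd',40000
--     elif iten[0][2:] in [i[2:] for i in prise[2:]]:
--         return '3rd',10000
--     elif iten[0][3:] in [i[3:] for i in prise[2:]]:
--         return '4th',4000
--     elif iten[0][4:] in [i[4:] for i in prise[2:]]:
--         return '5th',1000
--     elif iten[0][5:] in [i[5:] for i in prise[2:]]:
--         return '6th',200
--     else:
--         return ' did not win anything.',0
-- ===== SOURCE B (Python) =====
-- def checkprice(iten, prise):
--     t = iten[0]
--     if t in prise[0]:
--         return 'Special', 10000000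
--     if t in prise[1]:
--         return 'Grand', 2000000
--     best = 6
--     for p in prise[2:]:
--         k = 0
--         while k < 6 and t[k:] != p[k:]:
--             k += 1
--         best = min(best, k)
--     if best < 6:
--         return [('1st', 200000), ('2nd', 40000), ('3rd', 10000),
--                 ('4th', 4000), ('5th', 1000), ('6th', 200)][best]
--     return ' did not win anything.', 0
-- ===== Notes on version B (the rewrite author's own statement) =====
-- stated objective: alternative
-- what changed: Replaced A's six sequential membership scans over prise[2:] (one list comprehension rebuilt per tier) with a single pass that computes, for each prize, the minimal suffix depth k with iten[0][k:]==p[k:] and keeps the overall minimum, then maps that depth to the tier.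
import Mathlib
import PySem

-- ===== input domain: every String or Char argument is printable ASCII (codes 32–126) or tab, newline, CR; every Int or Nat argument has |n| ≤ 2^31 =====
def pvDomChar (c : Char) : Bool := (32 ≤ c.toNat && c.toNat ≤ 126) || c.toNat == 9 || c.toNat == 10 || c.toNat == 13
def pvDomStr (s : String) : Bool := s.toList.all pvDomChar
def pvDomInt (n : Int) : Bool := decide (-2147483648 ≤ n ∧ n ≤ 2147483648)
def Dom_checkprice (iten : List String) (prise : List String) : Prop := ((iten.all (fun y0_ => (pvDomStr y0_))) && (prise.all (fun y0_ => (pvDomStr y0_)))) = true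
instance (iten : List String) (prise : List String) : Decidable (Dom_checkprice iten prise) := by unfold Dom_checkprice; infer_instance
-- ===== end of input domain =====

-- B replaces A's six separate membership scans over prise[2:] with one pass that
-- computes the minimal matching suffix depth per prize (objective: alternative).

-- ===== PORT A =====
-- s[k:] for a natural k (A-side slicing helper)
def pvSlA (s : String) (k : Nat) : String := PySem.Str.slice s (some (k : Int)) none

def checkprice (iten : List String) (prise : List String) : String × Int :=
  match iten, prise with
  | t :: _, p0 :: p1 :: rest =>
    if PySem.Str.isIn t p0 then ("Special", 10000000)
    else if PySem.Str.isIn t p1 then ("Grand", 2000000)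
    else if rest.contains t then ("1st", 200000)
    else if (rest.map (fun i => pvSlA i 1)).contains (pvSlA t 1) then ("2nd", 40000)
    else if (rest.map (fun i => pvSlA i 2)).contains (pvSlA t 2) then ("3rd", 10000)
    else if (rest.map (fun i => pvSlA i 3)).contains (pvSlA t 3) then ("4th", 4000)
    else if (rest.map (fun i => pvSlA i 4)).contains (pvSlA t 4) then ("5th", 1000)
    else if (rest.map (fun i => pvSlA i 5)).contains (pvSlA t 5) then ("6th", 200)
    else (" did not win anything.", 0)
  | _, _ => ("", 0)  -- unreachable under Pre_ (Python raises IndexError)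

-- ===== PORT B =====
-- s[k:] for a natural k (B-side slicing helper)
def pvSl (s : String) (k : Nat) : String := PySem.Str.slice s (some (k : Int)) none

-- the while loop 'k = 0; while k < 6 and t[k:] != p[k:]: k += 1'
def pvDepth (t p : String) (k : Nat) : Nat :=
  if k < 6 then
    if pvSl t k ≠ pvSl p k then pvDepth t p (k + 1) else k
  else k
  termination_by 6 - k

def checkprice_alt (iten : List String) (prise : List String) : String × Int :=
  match iten with
  | [] => ("", 0)  -- unreachable under Pre_
  | t :: _ =>
    match prise with
    | [] => ("", 0)  -- unreachable under Pre_
    | p0 :: prest =>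
      match prest with
      | [] => ("", 0)  -- unreachable under Pre_
      | p1 :: rest =>
        if PySem.Str.isIn t p0 then ("Special", 10000000)
        else if PySem.Str.isIn t p1 then ("Grand", 2000000)
        else
          let best := rest.foldl (fun b p => min b (pvDepth t p 0)) 6
          let tiers : List (String × Int) :=
            [("1st", 200000), ("2nd", 40000), ("3rd", 10000),
             ("4th", 4000), ("5th", 1000), ("6th", 200)]
          if best < 6 then PySem.List.pyGetD tiers (best : Int) (" did not win anything.", 0)
          else (" did not win anything.", 0)

-- ===== PRECONDITION & SPEC =====
-- Pre_ excludes exactly the inputs where Python A raises IndexError: empty iten or prise shorter than 2.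
def Pre_checkprice (iten : List String) (prise : List String) : Prop :=
  iten ≠ [] ∧ 2 ≤ prise.length
instance (iten : List String) (prise : List String) : Decidable (Pre_checkprice iten prise) := by
  unfold Pre_checkprice; infer_instance

def pvWitness_checkprice : List String × List String :=
  (["123456"], ["99", "88", "123456"])

def Spec_checkprice (iten : List String) (prise : List String) (out : String × Int) : Prop := out = checkprice_alt iten prise
instance (iten : List String) (prise : List String) (out : String × Int) : Decidable (Spec_checkprice iten prise out) := by unfold Spec_checkprice; infer_instance

-- ===== CLAIM (what is proved, stated in full; the proofs are below) =====
def Claim_equal_checkprice : Prop := ∀ (iten : List String) (prise : List String), Dom_checkprice iten prise → Pre_checkprice iten prise → Spec_checkprice iten prise (checkprice iten prise)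

-- ===== LEMMAS AND PROOFS =====

lemma pvSlA_eq (s : String) (k : Nat) : pvSlA s k = pvSl s k := rfl

-- s[0:] = s
lemma pvSl_zero (s : String) : pvSl s 0 = s := by
  have h : (pvSl s 0).toList = s.toList := by
    simp [pvSl, PySem.Str.toList_slice]
  exact String.toList_inj.mp h

-- the while loop stops no later than the first matching depth
lemma pvDepth_le (t p : String) :
    ∀ n i k, 6 - i ≤ n → i ≤ k → k < 6 → pvSl t k = pvSl p k → pvDepth t p i ≤ k := by
  intro n
  induction n with
  | zero => intro i k h hik hk _; omega
  | succ n ih =>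
    intro i k h hik hk hm
    have hi6 : i < 6 := by omega
    rw [pvDepth, if_pos hi6]
    by_cases he : pvSl t i = pvSl p i
    · rw [if_neg (not_not_intro he)]; exact hik
    · rw [if_pos he]
      have hne : i ≠ k := fun h' => he (h' ▸ hm)
      exact ih (i + 1) k (by omega) (by omega) hk hm

-- if the while loop stops before 6 it stopped at a match
lemma pvDepth_match (t p : String) :
    ∀ n i, 6 - i ≤ n → pvDepth t p i < 6 →
      pvSl t (pvDepth t p i) = pvSl p (pvDepth t p i) := by
  intro n
  induction n with
  | zero =>
    intro i h hlt
    rw [pvDepth, if_neg (by omega : ¬ i < 6)] at hlt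
    exact absurd hlt (by omega)
  | succ n ih =>
    intro i h hlt
    by_cases hi6 : i < 6
    · rw [pvDepth, if_pos hi6] at hlt ⊢
      by_cases he : pvSl t i = pvSl p i
      · rw [if_neg (not_not_intro he)] at hlt ⊢; exact he
      · rw [if_pos he] at hlt ⊢; exact ih (i + 1) (by omega) hlt
    · rw [pvDepth, if_neg hi6] at hlt; exact absurd hlt (by omega)

-- fold facts for best = foldl (fun b p => min b (pvDepth t p 0)) a rest
lemma pvFold_le_init (t : String) :
    ∀ (l : List String) (a : Nat), l.foldl (fun b p => min b (pvDepth t p 0)) a ≤ a := by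
  intro l
  induction l with
  | nil => intro a; simp
  | cons x xs ih =>
    intro a
    exact le_trans (ih (min a (pvDepth t x 0))) (min_le_left _ _)

lemma pvFold_le_mem (t : String) :
    ∀ (l : List String) (a : Nat) (p : String), p ∈ l →
      l.foldl (fun b q => min b (pvDepth t q 0)) a ≤ pvDepth t p 0 := by
  intro l
  induction l with
  | nil => intro a p hp; cases hp
  | cons x xs ih =>
    intro a p hp
    rcases List.mem_cons.mp hp with h | h
    · subst h
      exact le_trans (pvFold_le_init t xs _) (min_le_right _ _)
    · exact ih _ p h

lemma pvFold_cases (t : String) :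
    ∀ (l : List String) (a : Nat),
      l.foldl (fun b q => min b (pvDepth t q 0)) a = a ∨
      ∃ p ∈ l, l.foldl (fun b q => min b (pvDepth t q 0)) a = pvDepth t p 0 := by
  intro l
  induction l with
  | nil => intro a; left; rfl
  | cons x xs ih =>
    intro a
    rcases ih (min a (pvDepth t x 0)) with h | ⟨p, hp, h⟩
    · rcases le_total a (pvDepth t x 0) with hm | hm
      · left; simp only [List.foldl_cons]; rw [h]; exact min_eq_left hm
      · right
        exact ⟨x, List.mem_cons_self, by simp only [List.foldl_cons]; rw [h]; exact min_eq_right hm⟩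
    · right; exact ⟨p, List.mem_cons_of_mem _ hp, by simp only [List.foldl_cons]; exact h⟩

-- membership in the mapped tier list is a match at depth k
lemma pvContains_iff (t : String) (rest : List String) (k : Nat) :
    ((rest.map (fun i => pvSl i k)).contains (pvSl t k) = true) ↔
      ∃ p ∈ rest, pvSl p k = pvSl t k := by
  simp

lemma pvContains_zero_iff (t : String) (rest : List String) :
    (rest.contains t = true) ↔ ∃ p ∈ rest, pvSl p 0 = pvSl t 0 := by
  simp [pvSl_zero]

-- ===== VERDICT (by name: the statement is the Claim_ definition above) =====
theorem checkprice_spec : Claim_equal_checkprice := by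
  unfold Claim_equal_checkprice
  intro iten prise _ hpre
  obtain ⟨hne, hlen⟩ := hpre
  unfold Spec_checkprice
  match iten, prise with
  | [], _ => exact absurd rfl hne
  | _ :: _, [] => simp at hlen
  | _ :: _, [_] => simp at hlen
  | t :: its, p0 :: p1 :: rest =>
    simp only [checkprice, checkprice_alt, pvSlA_eq]
    by_cases h0 : PySem.Str.isIn t p0 = true
    · rw [if_pos h0, if_pos h0]
    · rw [if_neg h0, if_neg h0]
      by_cases h1 : PySem.Str.isIn t p1 = true
      · rw [if_pos h1, if_pos h1]
      · rw [if_neg h1, if_neg h1]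
        set best := rest.foldl (fun b p => min b (pvDepth t p 0)) 6 with hbest
        have hb6 : best ≤ 6 := pvFold_le_init t rest 6
        have key1 : ∀ k : Nat, k < 6 → (∃ p ∈ rest, pvSl p k = pvSl t k) → best ≤ k := by
          rintro k hk ⟨p, hp, hm⟩
          exact le_trans (pvFold_le_mem t rest 6 p hp)
            (pvDepth_le t p 6 0 k (by omega) (by omega) hk hm.symm)
        have key2 : best < 6 → ∃ p ∈ rest, pvSl p best = pvSl t best := by
          intro hlt
          rcases pvFold_cases t rest 6 with h | ⟨p, hp, h⟩
          · exact absurd (hbest.trans h) (by omega)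
          · have h' : best = pvDepth t p 0 := hbest.trans h
            rw [h']
            exact ⟨p, hp, (pvDepth_match t p 6 0 (by omega) (h' ▸ hlt)).symm⟩
        by_cases c0 : rest.contains t = true
        · have hb : best = 0 :=
            Nat.le_zero.mp (key1 0 (by omega) ((pvContains_zero_iff t rest).mp c0))
          rw [if_pos c0, hb]; decide
        · rw [if_neg c0]
          have n0 : ¬ ∃ p ∈ rest, pvSl p 0 = pvSl t 0 :=
            fun h => c0 ((pvContains_zero_iff t rest).mpr h)
          by_cases c1 : (rest.map (fun i => pvSl i 1)).contains (pvSl t 1) = true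
          · have hb : best = 1 := by
              have hle : best ≤ 1 := key1 1 (by omega) ((pvContains_iff t rest 1).mp c1)
              rcases Nat.lt_or_ge best 1 with h | h
              · exact absurd (by simpa [Nat.lt_one_iff.mp h] using key2 (by omega)) n0
              · omega
            rw [if_pos c1, hb]; decide
          · rw [if_neg c1]
            have n1 : ¬ ∃ p ∈ rest, pvSl p 1 = pvSl t 1 :=
              fun h => c1 ((pvContains_iff t rest 1).mpr h)
            by_cases c2 : (rest.map (fun i => pvSl i 2)).contains (pvSl t 2) = true
            · have hb : best = 2 := by
                have hle : best ≤ 2 := key1 2 (by omega) ((pvContains_iff t rest 2).mp c2)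
                rcases Nat.lt_or_ge best 2 with h | h
                · have hmatch := key2 (by omega)
                  interval_cases best
                  · exact absurd hmatch n0
                  · exact absurd hmatch n1
                · omega
              rw [if_pos c2, hb]; decide
            · rw [if_neg c2]
              have n2 : ¬ ∃ p ∈ rest, pvSl p 2 = pvSl t 2 :=
                fun h => c2 ((pvContains_iff t rest 2).mpr h)
              by_cases c3 : (rest.map (fun i => pvSl i 3)).contains (pvSl t 3) = true
              · have hb : best = 3 := by
                  have hle : best ≤ 3 := key1 3 (by omega) ((pvContains_iff t rest 3).mp c3)
                  rcases Nat.lt_or_ge best 3 with h | h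
                  · have hmatch := key2 (by omega)
                    interval_cases best
                    · exact absurd hmatch n0
                    · exact absurd hmatch n1
                    · exact absurd hmatch n2
                  · omega
                rw [if_pos c3, hb]; decide
              · rw [if_neg c3]
                have n3 : ¬ ∃ p ∈ rest, pvSl p 3 = pvSl t 3 :=
                  fun h => c3 ((pvContains_iff t rest 3).mpr h)
                by_cases c4 : (rest.map (fun i => pvSl i 4)).contains (pvSl t 4) = true
                · have hb : best = 4 := by
                    have hle : best ≤ 4 := key1 4 (by omega) ((pvContains_iff t rest 4).mp c4)
                    rcases Nat.lt_or_ge best 4 with h | h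
                    · have hmatch := key2 (by omega)
                      interval_cases best
                      · exact absurd hmatch n0
                      · exact absurd hmatch n1
                      · exact absurd hmatch n2
                      · exact absurd hmatch n3
                    · omega
                  rw [if_pos c4, hb]; decide
                · rw [if_neg c4]
                  have n4 : ¬ ∃ p ∈ rest, pvSl p 4 = pvSl t 4 :=
                    fun h => c4 ((pvContains_iff t rest 4).mpr h)
                  by_cases c5 : (rest.map (fun i => pvSl i 5)).contains (pvSl t 5) = true
                  · have hb : best = 5 := by
                      have hle : best ≤ 5 := key1 5 (by omega) ((pvContains_iff t rest 5).mp c5)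
                      rcases Nat.lt_or_ge best 5 with h | h
                      · have hmatch := key2 (by omega)
                        interval_cases best
                        · exact absurd hmatch n0
                        · exact absurd hmatch n1
                        · exact absurd hmatch n2
                        · exact absurd hmatch n3
                        · exact absurd hmatch n4
                      · omega
                    rw [if_pos c5, hb]; decide
                  · rw [if_neg c5]
                    have n5 : ¬ ∃ p ∈ rest, pvSl p 5 = pvSl t 5 :=
                      fun h => c5 ((pvContains_iff t rest 5).mpr h)
                    have hb : best = 6 := by
                      rcases Nat.lt_or_ge best 6 with h | h
                      · have hmatch := key2 h
                        interval_cases best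
                        · exact absurd hmatch n0
                        · exact absurd hmatch n1
                        · exact absurd hmatch n2
                        · exact absurd hmatch n3
                        · exact absurd hmatch n4
                        · exact absurd hmatch n5
                      · omega
                    rw [hb]; decide
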